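-- pv_equiv track=rewrite | github.com/sun-hainan/Python | 参数算法/treewidth.py | dp_on_treewidth
-- ===== SOURCE A (Python) =====
-- def dp_on_treewidth(graph, bags, root_bag):
--     """
--     在给定树宽分解上做简单的动态规划——计算最大独立集。
--
--     这是一个演示性实现，使用状态压缩 DP。
--     每个bag有 2^{|bag|} 种选/不选状态。
--
--     参数:
--         graph: 原始图
--         bags: 树分解的顶点袋列表
--         root_bag: 根bag的顶点集合
--
--     返回:
--         max_indep_set_size: 最大独立集的大小
--     """
--     # 简化：只做路径分解的最后一步
--     n = len(graph)
--     last_bag = bags[-1] if bags else []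
--
--     # 枚举根bag中的选择情况
--     best = 0
--     for mask in range(1 << len(last_bag)):
--         selected = [last_bag[i] for i in range(len(last_bag)) if mask & (1 << i)]
--
--         # 检查选择是否构成独立集（只检查last_bag内的边）
--         ok = True
--         for v in selected:
--             for u in selected:
--                 if v != u and u in graph.get(v, []) and v < u:
--                     ok = False
--                     break
--             if not ok:
--                 break
--
--         if ok:
--             # 对于last_bag外的顶点，全部加入（无冲突）
--             best = max(best, len(selected) + (n - len(last_bag)))
--
--     return best
-- ===== SOURCE B (Python) =====
-- def dp_on_treewidth(graph, bags, root_bag):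
--     """Branch-and-prune MIS over the last bag's positions (precomputed conflict lists,
--     take/skip branching, conflict-free positions taken outright) instead of enumerating
--     all 2^k masks with a quadratic re-check each."""
--     n = len(graph)
--     bag = bags[-1] if bags else []
--     k = len(bag)
--
--     def conflict(a, b):
--         return (a < b and b in graph.get(a, [])) or (b < a and a in graph.get(b, []))
--
--     conf = [[j for j in range(k) if conflict(bag[i], bag[j])] for i in range(k)]
--
--     def mis(ps, excl):
--         if not ps:
--             return 0
--         i, rest = ps[0], ps[1:]
--         if i in excl:
--             return mis(rest, excl)
--         c = [j for j in conf[i] if j in rest and j not in excl]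
--         if not c:
--             return 1 + mis(rest, excl)
--         return max(mis(rest, excl), 1 + mis(rest, excl + c))
--
--     best = mis(list(range(k)), []) + n - k
--     return max(best, 0)
-- ===== Notes on version B (the rewrite author's own statement) =====
-- stated objective: faster
-- what changed: A enumerates all 2^k bit-masks of the last bag and re-checks independence of each subset with a quadratic double loop over the selected vertices; B precomputes per-position conflict lists once and finds the maximum independent set by a take/skip branch-and-prune recursion over the bag positions (a position with no live conflict is taken outright, so only conflicting positions cause branching), then adds n - k.
import Mathlib
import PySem

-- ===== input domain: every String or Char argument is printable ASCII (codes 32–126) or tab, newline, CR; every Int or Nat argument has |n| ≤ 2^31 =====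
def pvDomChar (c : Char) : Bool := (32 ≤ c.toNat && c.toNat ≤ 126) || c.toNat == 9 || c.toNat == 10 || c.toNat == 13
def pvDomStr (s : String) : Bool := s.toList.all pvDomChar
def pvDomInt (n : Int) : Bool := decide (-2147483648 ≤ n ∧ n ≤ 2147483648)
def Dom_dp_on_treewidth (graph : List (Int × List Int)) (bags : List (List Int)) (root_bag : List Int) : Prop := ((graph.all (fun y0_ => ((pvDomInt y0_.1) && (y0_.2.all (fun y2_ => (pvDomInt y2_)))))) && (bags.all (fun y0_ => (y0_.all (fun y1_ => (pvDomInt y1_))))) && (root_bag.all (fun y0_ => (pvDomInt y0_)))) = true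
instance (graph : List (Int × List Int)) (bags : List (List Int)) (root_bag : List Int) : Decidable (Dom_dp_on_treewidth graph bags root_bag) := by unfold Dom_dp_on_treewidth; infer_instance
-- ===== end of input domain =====

-- B replaces A's enumeration of all 2^k subsets of the last bag (with a quadratic
-- independence re-check per subset) by a take/skip branching recursion over the bag's
-- positions with precomputed per-position conflict lists; same return value.

-- ===== PORT A =====
-- list indexing below is guarded (indices come from range(len)), so pyGetD's default is never used
def dp_on_treewidth (graph : List (Int × List Int)) (bags : List (List Int)) (root_bag : List Int) : Int :=
  let n : Int := graph.length
  let last_bag : List Int := if bags ≠ [] then PySem.List.pyGetD bags (-1) [] else []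
  (PySem.List.pyRange 0 ((1 : Int) <<< last_bag.length) 1).foldl (fun best mask =>
      let selected : List Int :=
        ((PySem.List.pyRange 0 (last_bag.length : Int) 1).filter
            (fun i => PySem.Int.band mask ((1 : Int) <<< i.toNat) ≠ 0)).map
          (fun i => PySem.List.pyGetD last_bag i 0)
      let ok : Bool := ! selected.any (fun v => selected.any (fun u =>
            (v != u) && ((List.lookup v graph).getD []).contains u && decide (v < u)))
      if ok then max best ((selected.length : Int) + (n - (last_bag.length : Int))) else best) 0

-- ===== PORT B =====
def pvConflict (graph : List (Int × List Int)) (a b : Int) : Bool :=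
  (decide (a < b) && ((List.lookup a graph).getD []).contains b) ||
  (decide (b < a) && ((List.lookup b graph).getD []).contains a)

-- mis(ps, excl): best independent choice among remaining positions ps, excl already forbidden;
-- a position with no live conflict is taken outright
def pvMis (conf : List (List Nat)) : List Nat → List Nat → Nat
  | [], _ => 0
  | i :: rest, excl =>
    if i ∈ excl then pvMis conf rest excl
    else
      let c := ((conf[i]?).getD []).filter (fun j => decide (j ∈ rest ∧ j ∉ excl))
      if c = [] then 1 + pvMis conf rest excl
      else max (pvMis conf rest excl) (1 + pvMis conf rest (excl ++ c))

def dp_on_treewidth_alt (graph : List (Int × List Int)) (bags : List (List Int)) (root_bag : List Int) : Int :=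
  let n : Int := graph.length
  let bag : List Int := if bags ≠ [] then PySem.List.pyGetD bags (-1) [] else []
  let k := bag.length
  let conf : List (List Nat) :=
    (List.range k).map (fun i => (List.range k).filter (fun j => pvConflict graph (bag.getD i 0) (bag.getD j 0)))
  let best : Int := (pvMis conf (List.range k) [] : Int) + n - (k : Int)
  max best 0

-- ===== PRECONDITION & SPEC =====
def Spec_dp_on_treewidth (graph : List (Int × List Int)) (bags : List (List Int)) (root_bag : List Int) (out : Int) : Prop := out = dp_on_treewidth_alt graph bags root_bag
instance (graph : List (Int × List Int)) (bags : List (List Int)) (root_bag : List Int) (out : Int) : Decidable (Spec_dp_on_treewidth graph bags root_bag out) := by unfold Spec_dp_on_treewidth; infer_instance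

-- ===== CLAIM (what is proved, stated in full; the proofs are below) =====
def Claim_equal_dp_on_treewidth : Prop := ∀ (graph : List (Int × List Int)) (bags : List (List Int)) (root_bag : List Int), Dom_dp_on_treewidth graph bags root_bag → Spec_dp_on_treewidth graph bags root_bag (dp_on_treewidth graph bags root_bag)

-- ===== LEMMAS AND PROOFS =====

-- value at a bag position
def pvVAt (bag : List Int) (i : Nat) : Int := bag.getD i 0

-- position-level conflict
def pvConfP (graph : List (Int × List Int)) (bag : List Int) (i j : Nat) : Bool :=
  pvConflict graph (pvVAt bag i) (pvVAt bag j)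

-- the positions a mask selects
def pvSelPos (k m : Nat) : List Nat := (List.range k).filter (fun i => m.testBit i)

-- a set of positions is independent
def pvIndepS (graph : List (Int × List Int)) (bag : List Int) (S : List Nat) : Prop :=
  ∀ i ∈ S, ∀ j ∈ S, pvConfP graph bag i j = false

-- A's independence check on a selected-values list
def pvOkA (graph : List (Int × List Int)) (sel : List Int) : Bool :=
  ! sel.any (fun v => sel.any (fun u =>
      (v != u) && ((List.lookup v graph).getD []).contains u && decide (v < u)))

-- the mask of a set of positions
def pvMOf (S : List Nat) : Nat := S.foldr (fun i a => 2 ^ i ||| a) 0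

-- B's conflict table
def pvConfTab (graph : List (Int × List Int)) (bag : List Int) : List (List Nat) :=
  (List.range bag.length).map
    (fun i => (List.range bag.length).filter (fun j => pvConfP graph bag i j))

theorem pv_toNat_two_pow (k : Nat) : ((2:Int)^k).toNat = 2^k := by
  rw [show ((2:Int)^k) = ((2^k : Nat) : Int) by push_cast; ring, Int.toNat_natCast]

theorem pv_band_bit (m i : Nat) :
    PySem.Int.band ((m:Int)) ((1:Int) <<< i) = ((m &&& 2^i : Nat) : Int) := by
  rw [show ((1:Int) <<< i) = (2:Int)^i by simp [Int.shiftLeft_eq],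
      PySem.Int.band_of_nonneg (by positivity) (by positivity)]
  simp [pv_toNat_two_pow]

theorem pv_and_two_pow_ne (m i : Nat) : (m &&& 2 ^ i ≠ 0) ↔ m.testBit i := by
  rw [Nat.and_two_pow]; cases h : m.testBit i <;> simp

theorem pv_bit_pred (m i : Nat) :
    (decide (PySem.Int.band ((m:Int)) ((1:Int) <<< i) ≠ 0)) = m.testBit i := by
  simp only [pv_band_bit, ne_eq, Nat.cast_eq_zero]
  cases h : m.testBit i
  · have h0 : m &&& 2^i = 0 := by
      by_contra hc
      exact absurd ((pv_and_two_pow_ne m i).mp hc) (by simp [h])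
    simp [h0]
  · have h0 : m &&& 2^i ≠ 0 := (pv_and_two_pow_ne m i).mpr (by simp [h])
    simp [h0]

-- generic fold lemmas for A's loop shape
theorem pv_foldl_ge_init (l : List Nat) (p : Nat → Bool) (v : Nat → Int) (a : Int) :
    a ≤ l.foldl (fun acc m => if p m then max acc (v m) else acc) a := by
  induction l generalizing a with
  | nil => simp
  | cons x t ih =>
    simp only [List.foldl_cons]
    split
    · exact le_trans (le_max_left _ _) (ih _)
    · exact ih _

theorem pv_foldl_ge_mem (l : List Nat) (p : Nat → Bool) (v : Nat → Int) (a : Int)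
    (m : Nat) (hm : m ∈ l) (hp : p m = true) :
    v m ≤ l.foldl (fun acc m => if p m then max acc (v m) else acc) a := by
  induction l generalizing a with
  | nil => simp at hm
  | cons x t ih =>
    simp only [List.foldl_cons]
    rcases List.mem_cons.mp hm with h | h
    · subst h
      rw [hp]
      exact le_trans (le_max_right _ _) (pv_foldl_ge_init _ _ _ _)
    · exact ih _ h

theorem pv_foldl_cases (l : List Nat) (p : Nat → Bool) (v : Nat → Int) (a : Int) :
    l.foldl (fun acc m => if p m then max acc (v m) else acc) a = a ∨
    ∃ m ∈ l, p m = true ∧ l.foldl (fun acc m => if p m then max acc (v m) else acc) a = v m := by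
  induction l generalizing a with
  | nil => left; rfl
  | cons x t ih =>
    simp only [List.foldl_cons]
    by_cases hp : p x = true
    · rw [hp]; simp only [if_true]
      rcases ih (max a (v x)) with h | ⟨m, hm, hpm, h⟩
      · rcases max_cases a (v x) with ⟨he, _⟩ | ⟨he, _⟩
        · left; rw [h, he]
        · right; exact ⟨x, List.mem_cons_self, hp, by rw [h, he]⟩
      · right; exact ⟨m, List.mem_cons_of_mem _ hm, hpm, h⟩
    · rw [Bool.not_eq_true] at hp
      rw [hp]; simp only [Bool.false_eq_true, if_false]
      rcases ih a with h | ⟨m, hm, hpm, h⟩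
      · left; exact h
      · right; exact ⟨m, List.mem_cons_of_mem _ hm, hpm, h⟩

-- A's loop in canonical form
theorem pvA_norm (g : List (Int × List Int)) (bag : List Int) (n : Int) :
    (PySem.List.pyRange 0 ((1 : Int) <<< bag.length) 1).foldl (fun best mask =>
      let selected : List Int :=
        ((PySem.List.pyRange 0 (bag.length : Int) 1).filter
            (fun i => PySem.Int.band mask ((1 : Int) <<< i.toNat) ≠ 0)).map
          (fun i => PySem.List.pyGetD bag i 0)
      let ok : Bool := ! selected.any (fun v => selected.any (fun u =>
            (v != u) && ((List.lookup v g).getD []).contains u && decide (v < u)))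
      if ok then max best ((selected.length : Int) + (n - (bag.length : Int))) else best) 0
  = (List.range (2^bag.length)).foldl (fun a m =>
      if pvOkA g ((pvSelPos bag.length m).map (pvVAt bag)) then
        max a (((pvSelPos bag.length m).length : Int) + (n - (bag.length : Int))) else a) 0 := by
  rw [show PySem.List.pyRange 0 ((1 : Int) <<< bag.length) 1
        = (List.range (2^bag.length)).map (fun k : Nat => ((k:Int))) by
      rw [PySem.List.pyRange_one]; simp [Int.shiftLeft_eq, pv_toNat_two_pow]]
  rw [List.foldl_map]
  apply PySem.List.foldl_congr_mem
  intro a m _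
  have hsel : ((PySem.List.pyRange 0 (bag.length : Int) 1).filter
        (fun i => PySem.Int.band ((m:Int)) ((1 : Int) <<< i.toNat) ≠ 0)).map
        (fun i => PySem.List.pyGetD bag i 0)
      = (pvSelPos bag.length m).map (pvVAt bag) := by
    rw [PySem.List.pyRange_zero_nat, List.filter_map, List.map_map]
    have hf : (List.range bag.length).filter
        ((fun i => decide (PySem.Int.band ((m:Int)) ((1 : Int) <<< i.toNat) ≠ 0)) ∘ (fun k : Nat => ((k:Int))))
        = pvSelPos bag.length m := by
      apply List.filter_congr
      intro i _
      simp only [Function.comp, Int.toNat_natCast, Int.shiftLeft_natCast_right]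
      exact pv_bit_pred m i
    rw [hf]
    apply List.map_congr_left
    intro i _
    simp [pvVAt]
  simp only [hsel, List.length_map]
  rfl

theorem pvConflict_self (g : List (Int × List Int)) (a : Int) : pvConflict g a a = false := by
  simp [pvConflict]

theorem pvConflict_comm (g : List (Int × List Int)) (a b : Int) :
    pvConflict g a b = pvConflict g b a := by
  simp only [pvConflict]; exact Bool.or_comm _ _

theorem pvConfTab_get (g : List (Int × List Int)) (bag : List Int) (i : Nat)
    (hi : i < bag.length) :
    (((pvConfTab g bag)[i]?).getD []) = (List.range bag.length).filter (fun j => pvConfP g bag i j) := by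
  simp [pvConfTab, hi]

-- A's check on the values equals independence of the positions
theorem pvOkA_iff (g : List (Int × List Int)) (bag : List Int) (S : List Nat) :
    pvOkA g (S.map (pvVAt bag)) = true ↔ pvIndepS g bag S := by
  simp only [pvOkA, pvIndepS, pvConfP, pvConflict, Bool.not_eq_true', Bool.not_eq_true,
    List.any_eq_false, List.mem_map, Bool.and_eq_false_iff, Bool.or_eq_false_iff,
    bne_eq_false_iff_eq, decide_eq_false_iff_not, forall_exists_index, and_imp]
  constructor
  · intro H i hi j hj
    have hij := H (pvVAt bag i) i hi rfl (pvVAt bag j) j hj rfl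
    have hji := H (pvVAt bag j) j hj rfl (pvVAt bag i) i hi rfl
    constructor
    · rcases hij with (he | hc) | hn
      · left; intro hlt; omega
      · right; exact hc
      · left; exact hn
    · rcases hji with (he | hc) | hn
      · left; intro hlt; omega
      · right; exact hc
      · left; exact hn
  · intro H v i hi hvi u j hj huj
    subst hvi huj
    rcases (H i hi j hj).1 with hn | hc
    · right; exact hn
    · left; right; exact hc

-- unfolded cons equation for pvMis
theorem pvMis_cons (conf : List (List Nat)) (i : Nat) (rest excl : List Nat) :
    pvMis conf (i :: rest) excl =
      if i ∈ excl then pvMis conf rest excl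
      else
        if ((conf[i]?).getD []).filter (fun j => decide (j ∈ rest ∧ j ∉ excl)) = [] then
          1 + pvMis conf rest excl
        else
          max (pvMis conf rest excl)
            (1 + pvMis conf rest
              (excl ++ ((conf[i]?).getD []).filter (fun j => decide (j ∈ rest ∧ j ∉ excl)))) := rfl

-- members of the live-conflict list conflict with i, and conversely
theorem pvC_mem (g : List (Int × List Int)) (bag : List Int) (i : Nat) (rest excl : List Nat)
    (hi : i < bag.length) (j : Nat)
    (hj : j ∈ (((pvConfTab g bag)[i]?).getD []).filter (fun j => decide (j ∈ rest ∧ j ∉ excl))) :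
    pvConfP g bag i j = true := by
  have h1 := (List.mem_filter.mp hj).1
  rw [pvConfTab_get g bag i hi] at h1
  exact (List.mem_filter.mp h1).2

theorem pvC_mem' (g : List (Int × List Int)) (bag : List Int) (i : Nat) (rest excl : List Nat)
    (hi : i < bag.length) (j : Nat) (hjk : j < bag.length)
    (hjr : j ∈ rest) (hjx : j ∉ excl) (hcj : pvConfP g bag i j = true) :
    j ∈ (((pvConfTab g bag)[i]?).getD []).filter (fun j => decide (j ∈ rest ∧ j ∉ excl)) := by
  apply List.mem_filter.mpr
  refine ⟨?_, by simp [hjr, hjx]⟩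
  rw [pvConfTab_get g bag i hi]
  exact List.mem_filter.mpr ⟨List.mem_range.mpr hjk, hcj⟩

-- lower bound for pvMis
theorem pvMis_ge (g : List (Int × List Int)) (bag : List Int) (ps excl S : List Nat)
    (hk : ∀ x ∈ ps, x < bag.length) (hsub : S.Sublist ps)
    (hex : ∀ i ∈ S, i ∉ excl) (hind : pvIndepS g bag S) :
    S.length ≤ pvMis (pvConfTab g bag) ps excl := by
  induction ps generalizing S excl with
  | nil =>
    rw [List.sublist_nil.mp hsub]
    simp [pvMis]
  | cons i rest ih =>
    have hirest : ∀ x ∈ rest, x < bag.length := fun x hx => hk x (List.mem_cons_of_mem _ hx)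
    rw [pvMis_cons]
    rcases List.sublist_cons_iff.mp hsub with h | ⟨S', rfl, hS'⟩
    · have hle := ih excl S hirest h hex hind
      by_cases hiex : i ∈ excl
      · rw [if_pos hiex]; exact hle
      · rw [if_neg hiex]
        by_cases hc : (((pvConfTab g bag)[i]?).getD []).filter (fun j => decide (j ∈ rest ∧ j ∉ excl)) = []
        · rw [if_pos hc]; omega
        · rw [if_neg hc]; exact le_trans hle (le_max_left _ _)
    · have hiS : i ∈ (i :: S') := List.mem_cons_self
      have hiex : i ∉ excl := hex i hiS
      have hex0 : ∀ j ∈ S', j ∉ excl := fun j hj => hex j (List.mem_cons_of_mem _ hj)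
      have hind' : pvIndepS g bag S' := fun x hx y hy =>
        hind x (List.mem_cons_of_mem _ hx) y (List.mem_cons_of_mem _ hy)
      rw [if_neg hiex]
      by_cases hc : (((pvConfTab g bag)[i]?).getD []).filter (fun j => decide (j ∈ rest ∧ j ∉ excl)) = []
      · rw [if_pos hc]
        have hle := ih excl S' hirest hS' hex0 hind'
        simp only [List.length_cons]
        omega
      · rw [if_neg hc]
        have hex' : ∀ j ∈ S', j ∉ excl ++ (((pvConfTab g bag)[i]?).getD []).filter
            (fun j => decide (j ∈ rest ∧ j ∉ excl)) := by
          intro j hj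
          rw [List.mem_append]
          rintro (hjx | hjc)
          · exact hex0 j hj hjx
          · have hcj := pvC_mem g bag i rest excl (hk i List.mem_cons_self) j hjc
            have hfalse := hind i hiS j (List.mem_cons_of_mem _ hj)
            rw [hfalse] at hcj
            exact Bool.false_ne_true hcj
        have hle := ih (excl ++ (((pvConfTab g bag)[i]?).getD []).filter
            (fun j => decide (j ∈ rest ∧ j ∉ excl))) S' hirest hS' hex' hind'
        simp only [List.length_cons]
        have hstep : S'.length + 1 ≤ 1 + pvMis (pvConfTab g bag) rest
            (excl ++ (((pvConfTab g bag)[i]?).getD []).filter (fun j => decide (j ∈ rest ∧ j ∉ excl))) := by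
          omega
        exact le_trans hstep (le_max_right _ _)

-- pvMis is attained by an independent set
theorem pvMis_wit (g : List (Int × List Int)) (bag : List Int) (ps excl : List Nat)
    (hk : ∀ x ∈ ps, x < bag.length) :
    ∃ S, S.Sublist ps ∧ (∀ i ∈ S, i ∉ excl) ∧ pvIndepS g bag S ∧
      S.length = pvMis (pvConfTab g bag) ps excl := by
  induction ps generalizing excl with
  | nil => exact ⟨[], List.Sublist.refl _, by simp, by intro i hi; simp at hi, by simp [pvMis]⟩
  | cons i rest ih =>
    have hirest : ∀ x ∈ rest, x < bag.length := fun x hx => hk x (List.mem_cons_of_mem _ hx)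
    rw [pvMis_cons]
    by_cases hiex : i ∈ excl
    · obtain ⟨S, hsub, hex, hind, hlen⟩ := ih excl hirest
      exact ⟨S, hsub.cons i, hex, hind, by rw [if_pos hiex]; exact hlen⟩
    · rw [if_neg hiex]
      obtain ⟨S1, hsub1, hex1, hind1, hlen1⟩ := ih excl hirest
      by_cases hc : (((pvConfTab g bag)[i]?).getD []).filter (fun j => decide (j ∈ rest ∧ j ∉ excl)) = []
      · -- no live conflict: i is taken outright
        rw [if_pos hc]
        have hnotconf : ∀ j ∈ S1, pvConfP g bag i j = false := by
          intro j hj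
          by_contra hcj
          rw [Bool.not_eq_false] at hcj
          have hmem := pvC_mem' g bag i rest excl (hk i List.mem_cons_self) j
            (hirest j (hsub1.subset hj)) (hsub1.subset hj) (hex1 j hj) hcj
          rw [hc] at hmem
          exact absurd hmem (List.not_mem_nil)
        refine ⟨i :: S1, hsub1.cons₂ i, ?_, ?_, ?_⟩
        · intro j hj
          rcases List.mem_cons.mp hj with rfl | hj'
          · exact hiex
          · exact hex1 j hj'
        · intro x hx y hy
          rcases List.mem_cons.mp hx with rfl | hx'
          · rcases List.mem_cons.mp hy with rfl | hy'
            · simp [pvConfP, pvConflict_self]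
            · exact hnotconf y hy'
          · rcases List.mem_cons.mp hy with rfl | hy'
            · unfold pvConfP
              rw [pvConflict_comm]
              exact hnotconf x hx'
            · exact hind1 x hx' y hy'
        · simp only [List.length_cons]
          omega
      · rw [if_neg hc]
        obtain ⟨S2, hsub2, hex2, hind2, hlen2⟩ := ih (excl ++ (((pvConfTab g bag)[i]?).getD []).filter
            (fun j => decide (j ∈ rest ∧ j ∉ excl))) hirest
        by_cases hcase : 1 + pvMis (pvConfTab g bag) rest (excl ++ (((pvConfTab g bag)[i]?).getD []).filter
              (fun j => decide (j ∈ rest ∧ j ∉ excl)))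
            ≤ pvMis (pvConfTab g bag) rest excl
        · refine ⟨S1, hsub1.cons i, hex1, hind1, ?_⟩
          omega
        · refine ⟨i :: S2, hsub2.cons₂ i, ?_, ?_, ?_⟩
          · intro j hj
            rcases List.mem_cons.mp hj with rfl | hj'
            · exact hiex
            · exact fun hjx => hex2 j hj' (List.mem_append_left _ hjx)
          · have hnotconf : ∀ j ∈ S2, pvConfP g bag i j = false := by
              intro j hj
              by_contra hcj
              rw [Bool.not_eq_false] at hcj
              have hjx : j ∉ excl := fun hx => hex2 j hj (List.mem_append_left _ hx)
              have hmem := pvC_mem' g bag i rest excl (hk i List.mem_cons_self) j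
                (hirest j (hsub2.subset hj)) (hsub2.subset hj) hjx hcj
              exact hex2 j hj (List.mem_append_right _ hmem)
            intro x hx y hy
            rcases List.mem_cons.mp hx with rfl | hx'
            · rcases List.mem_cons.mp hy with rfl | hy'
              · simp [pvConfP, pvConflict_self]
              · exact hnotconf y hy'
            · rcases List.mem_cons.mp hy with rfl | hy'
              · unfold pvConfP
                rw [pvConflict_comm]
                exact hnotconf x hx'
              · exact hind2 x hx' y hy'
          · simp only [List.length_cons]
            omega

theorem pvMOf_testBit (S : List Nat) (j : Nat) : (pvMOf S).testBit j = decide (j ∈ S) := by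
  induction S with
  | nil => simp [pvMOf]
  | cons i t ih =>
    simp only [pvMOf, List.foldr_cons] at *
    rw [Nat.testBit_or, ih, Nat.testBit_two_pow]
    simp [List.mem_cons, eq_comm]

theorem pvMOf_lt (S : List Nat) (k : Nat) (h : ∀ i ∈ S, i < k) : pvMOf S < 2^k := by
  induction S with
  | nil => simp only [pvMOf, List.foldr_nil]; exact Nat.two_pow_pos k
  | cons i t ih =>
    simp only [pvMOf, List.foldr_cons]
    exact Nat.or_lt_two_pow
      (Nat.pow_lt_pow_right (by norm_num) (h i List.mem_cons_self))
      (ih (fun x hx => h x (List.mem_cons_of_mem _ hx)))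

theorem pv_filter_mem_of_sublist (l S : List Nat) (h : S.Sublist l) (hl : l.Nodup) :
    l.filter (fun x => decide (x ∈ S)) = S := by
  induction h with
  | slnil => rfl
  | @cons S' l' a h ih =>
    have ha : a ∉ S' := fun hmem => (List.nodup_cons.mp hl).1 (h.subset hmem)
    simp only [List.filter_cons, ha, decide_false]
    exact ih (List.nodup_cons.mp hl).2
  | @cons₂ S' l' a h ih =>
    have ha : a ∉ l' := (List.nodup_cons.mp hl).1
    simp only [List.filter_cons, List.mem_cons, decide_true, true_or, if_pos]
    have hft : l'.filter (fun x => decide (x = a ∨ x ∈ S')) = l'.filter (fun x => decide (x ∈ S')) := by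
      apply List.filter_congr
      intro x hx
      have hxa : x ≠ a := fun he => ha (he ▸ hx)
      simp [hxa]
    rw [hft, ih (List.nodup_cons.mp hl).2]

theorem pvSelPos_mOf (k : Nat) (S : List Nat) (h : S.Sublist (List.range k)) :
    pvSelPos k (pvMOf S) = S := by
  unfold pvSelPos
  have : (List.range k).filter (fun i => (pvMOf S).testBit i)
      = (List.range k).filter (fun x => decide (x ∈ S)) := by
    apply List.filter_congr
    intro i _
    exact pvMOf_testBit S i
  rw [this, pv_filter_mem_of_sublist _ _ h (List.nodup_range)]

-- the central identity between A's loop and B's recursion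
theorem pv_central (g : List (Int × List Int)) (bag : List Int) (n : Int) :
    (List.range (2^bag.length)).foldl (fun a m =>
      if pvOkA g ((pvSelPos bag.length m).map (pvVAt bag)) then
        max a (((pvSelPos bag.length m).length : Int) + (n - (bag.length : Int))) else a) 0
  = max ((pvMis (pvConfTab g bag) (List.range bag.length) [] : Nat) + n - (bag.length : Int)) 0 := by
  set k := bag.length with hk
  set Mis : Nat := pvMis (pvConfTab g bag) (List.range k) [] with hMis
  apply le_antisymm
  · rcases pv_foldl_cases (List.range (2^k))
        (fun m => pvOkA g ((pvSelPos k m).map (pvVAt bag)))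
        (fun m => ((pvSelPos k m).length : Int) + (n - (k : Int))) 0 with h | ⟨m, _, hp, h⟩
    · rw [h]; exact le_max_right _ _
    · rw [h]
      have hind := (pvOkA_iff g bag (pvSelPos k m)).mp hp
      have hlen : (pvSelPos k m).length ≤ Mis := by
        apply pvMis_ge g bag (List.range k) [] (pvSelPos k m)
          (fun x hx => List.mem_range.mp hx) List.filter_sublist (by simp) hind
      calc ((pvSelPos k m).length : Int) + (n - (k : Int)) ≤ (Mis : Int) + (n - (k:Int)) := by
            omega
        _ ≤ max ((Mis : Int) + n - (k : Int)) 0 := by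
            apply le_trans (le_of_eq (by ring)) (le_max_left _ _)
  · apply max_le
    · obtain ⟨S, hsub, _, hind, hlen⟩ := pvMis_wit g bag (List.range k) []
        (fun x hx => List.mem_range.mp hx)
      have hmem : pvMOf S ∈ List.range (2^k) :=
        List.mem_range.mpr (pvMOf_lt S k (fun i hi => List.mem_range.mp (hsub.subset hi)))
      have hsel : pvSelPos k (pvMOf S) = S := pvSelPos_mOf k S hsub
      have hok : pvOkA g ((pvSelPos k (pvMOf S)).map (pvVAt bag)) = true := by
        rw [hsel]; exact (pvOkA_iff g bag S).mpr hind
      have := pv_foldl_ge_mem (List.range (2^k))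
        (fun m => pvOkA g ((pvSelPos k m).map (pvVAt bag)))
        (fun m => ((pvSelPos k m).length : Int) + (n - (k : Int))) 0 (pvMOf S) hmem hok
      calc (Mis : Int) + n - (k : Int) = ((pvSelPos k (pvMOf S)).length : Int) + (n - (k : Int)) := by
            rw [hsel, hlen]; ring
        _ ≤ _ := this
    · exact pv_foldl_ge_init _ _ _ _

-- ===== VERDICT (by name: the statement is the Claim_ definition above) =====
theorem dp_on_treewidth_spec : Claim_equal_dp_on_treewidth := by
  intro g bags rb _
  show dp_on_treewidth g bags rb = dp_on_treewidth_alt g bags rb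
  unfold dp_on_treewidth dp_on_treewidth_alt
  simp only []
  rw [pvA_norm g (if bags ≠ [] then PySem.List.pyGetD bags (-1) [] else []) (g.length : Int)]
  rw [pv_central]
  rfl
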